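-- pv_equiv track=rewrite | github.com/accarol/ATP2024 | TP8/tpc2.py | produtoM3
-- ===== SOURCE A (Python) =====
-- def produtoM3(lista):
--     menor1 = lista[0]
--     menor2 = lista[1]
--     menor3 = lista[2]
--     if menor1 > menor2:
--         menor1, menor2 = menor2, menor1
--     if menor2 > menor3:
--         menor2, menor3 = menor3, menor2
--     if menor1 > menor2:
--         menor1, menor2 = menor2, menor1
--     for x in lista[3:]:
--         if x < menor1:
--             menor3 = menor2
--             menor2 = menor1
--             menor1 = x
--         elif x < menor2:
--             menor3 = menor2
--             menor2 = x
--         elif x < menor3: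
--             menor3 = x
--     mprod = menor1*menor2*menor3
--     return mprod
-- ===== SOURCE B (Python) =====
-- def produtoM3(lista):
--     s = sorted(lista)
--     return s[0] * s[1] * s[2]
-- ===== Notes on version B (the rewrite author's own statement) =====
-- stated objective: simpler
-- what changed: replaces A's single-pass three-minimum tracking with explicit swaps by sorting the list once and multiplying its first three elements
import Mathlib
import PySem

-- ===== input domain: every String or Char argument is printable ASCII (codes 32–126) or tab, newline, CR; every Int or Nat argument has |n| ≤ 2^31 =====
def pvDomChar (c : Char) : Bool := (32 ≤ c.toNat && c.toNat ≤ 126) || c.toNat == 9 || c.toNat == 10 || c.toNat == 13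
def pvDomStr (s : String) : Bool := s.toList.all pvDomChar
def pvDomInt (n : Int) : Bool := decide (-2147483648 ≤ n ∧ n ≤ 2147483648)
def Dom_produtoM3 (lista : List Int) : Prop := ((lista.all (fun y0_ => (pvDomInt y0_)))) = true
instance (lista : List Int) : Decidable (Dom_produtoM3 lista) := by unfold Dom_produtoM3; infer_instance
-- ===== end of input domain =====

-- B sorts the list once and multiplies its first three elements, replacing A's
-- hand-rolled running three-minimum tracking (objective: simpler).


-- ===== PORT A =====
-- the body of A's 'for x in lista[3:]' loop: updates (menor1, menor2, menor3)
def m3Step (m : Int × Int × Int) (x : Int) : Int × Int × Int :=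
  if x < m.1 then (x, m.1, m.2.1)
  else if x < m.2.1 then (m.1, x, m.2.1)
  else if x < m.2.2 then (m.1, m.2.1, x)
  else m

def produtoM3 (lista : List Int) : Int :=
  match PySem.List.pyGet? lista 0, PySem.List.pyGet? lista 1, PySem.List.pyGet? lista 2 with
  | some a, some b, some c =>
      -- the three initial conditional swaps ('menor1, menor2 = menor2, menor1' is a pair swap)
      let p1 := if a > b then (b, a) else (a, b)
      let p2 := if p1.2 > c then (c, p1.2) else (p1.2, c)
      let p3 := if p1.1 > p2.1 then (p2.1, p1.1) else (p1.1, p2.1)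
      let r := (PySem.List.slice lista (some 3) none).foldl m3Step (p3.1, p3.2, p2.2)
      r.1 * r.2.1 * r.2.2
  | _, _, _ => 0   -- IndexError (len < 3); excluded by Pre_produtoM3

-- ===== PORT B =====
def produtoM3_alt (lista : List Int) : Int :=
  let s := PySem.List.sorted lista (fun x => x) false
  match (PySem.List.pyGet? s 0).bind fun a =>
        (PySem.List.pyGet? s 1).bind fun b =>
        (PySem.List.pyGet? s 2).map fun c => a * b * c with
  | some p => p
  | none => 0   -- IndexError (len < 3); excluded by Pre_produtoM3

-- ===== PRECONDITION & SPEC =====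
-- Pre_ excludes exactly the lists of fewer than 3 elements, on which A raises IndexError.
def Pre_produtoM3 (lista : List Int) : Prop := 3 ≤ lista.length
instance (lista : List Int) : Decidable (Pre_produtoM3 lista) := by unfold Pre_produtoM3; infer_instance
def pvWitness_produtoM3 : List Int := [5, -2, 7, 1]

def Spec_produtoM3 (lista : List Int) (out : Int) : Prop := out = produtoM3_alt lista
instance (lista : List Int) (out : Int) : Decidable (Spec_produtoM3 lista out) := by unfold Spec_produtoM3; infer_instance

-- ===== CLAIM (what is proved, stated in full; the proofs are below) =====
def Claim_equal_produtoM3 : Prop := ∀ (lista : List Int), Dom_produtoM3 lista → Pre_produtoM3 lista → Spec_produtoM3 lista (produtoM3 lista)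

-- ===== LEMMAS AND PROOFS =====

-- permutations of three-element lists
theorem p_swap12 (x y z : Int) : [y, x, z].Perm [x, y, z] := List.Perm.swap x y [z]
theorem p_swap23 (x y z : Int) : [x, z, y].Perm [x, y, z] := (List.Perm.swap y z []).cons x
theorem p_rot (x y z : Int) : [z, x, y].Perm [x, y, z] :=
  (List.Perm.swap x z [y]).trans (p_swap23 x y z)
theorem p_rot2 (x y z : Int) : [y, z, x].Perm [x, y, z] :=
  ((List.Perm.swap x z []).cons y).trans (p_swap12 x y z)
theorem p_rev (x y z : Int) : [z, y, x].Perm [x, y, z] :=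
  (List.Perm.swap y z [x]).trans (p_rot2 x y z)

-- pull an element from the middle of the tail to the front, past three fixed heads
theorem perm_pull (a b c d : Int) (R rest : List Int) :
    (d :: a :: b :: c :: (R ++ rest)).Perm (a :: b :: c :: (R ++ d :: rest)) := by
  have h1 : ([a, b, c] ++ d :: (R ++ rest)).Perm (d :: ([a, b, c] ++ (R ++ rest))) :=
    List.perm_middle
  have h2 : (R ++ d :: rest).Perm (d :: (R ++ rest)) := List.perm_middle
  exact h1.symm.trans (((h2.symm.cons c).cons b).cons a)

-- loop invariant for A's fold: the state is the sorted three smallest of what has been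
-- consumed, R collects the discarded (≥ third-minimum) elements
theorem fold_inv (rest : List Int) : ∀ (m1 m2 m3 : Int) (R : List Int),
    m1 ≤ m2 → m2 ≤ m3 → (∀ x ∈ R, m3 ≤ x) →
    ∃ R',
      (rest.foldl m3Step (m1, m2, m3)).1 ≤ (rest.foldl m3Step (m1, m2, m3)).2.1 ∧
      (rest.foldl m3Step (m1, m2, m3)).2.1 ≤ (rest.foldl m3Step (m1, m2, m3)).2.2 ∧
      (∀ x ∈ R', (rest.foldl m3Step (m1, m2, m3)).2.2 ≤ x) ∧
      ((rest.foldl m3Step (m1, m2, m3)).1 :: (rest.foldl m3Step (m1, m2, m3)).2.1 ::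
        (rest.foldl m3Step (m1, m2, m3)).2.2 :: R').Perm (m1 :: m2 :: m3 :: (R ++ rest)) := by
  induction rest with
  | nil =>
      intro m1 m2 m3 R h1 h2 hR
      exact ⟨R, h1, h2, hR, by simp⟩
  | cons x rest ih =>
      intro m1 m2 m3 R h1 h2 hR
      simp only [List.foldl_cons, m3Step]
      by_cases hx1 : x < m1
      · simp only [if_pos hx1]
        obtain ⟨R', s1, s2, s3, hp⟩ := ih x m1 m2 (m3 :: R) (le_of_lt hx1) h1
          (by intro y hy
              rcases List.mem_cons.mp hy with rfl | hy
              · exact h2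
              · exact h2.trans (hR _ hy))
        exact ⟨R', s1, s2, s3, hp.trans (perm_pull m1 m2 m3 x R rest)⟩
      · simp only [if_neg hx1]
        by_cases hx2 : x < m2
        · simp only [if_pos hx2]
          obtain ⟨R', s1, s2, s3, hp⟩ := ih m1 x m2 (m3 :: R) (not_lt.mp hx1) (le_of_lt hx2)
            (by intro y hy
                rcases List.mem_cons.mp hy with rfl | hy
                · exact h2
                · exact h2.trans (hR _ hy))
          refine ⟨R', s1, s2, s3, hp.trans ?_⟩
          exact (List.Perm.swap x m1 _).trans (perm_pull m1 m2 m3 x R rest)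
        · simp only [if_neg hx2]
          by_cases hx3 : x < m3
          · simp only [if_pos hx3]
            obtain ⟨R', s1, s2, s3, hp⟩ := ih m1 m2 x (m3 :: R) h1 (not_lt.mp hx2)
              (by intro y hy
                  rcases List.mem_cons.mp hy with rfl | hy
                  · exact le_of_lt hx3
                  · exact (le_of_lt hx3).trans (hR _ hy))
            refine ⟨R', s1, s2, s3, hp.trans ?_⟩
            exact (((List.Perm.swap x m2 _).cons m1).trans
              (List.Perm.swap x m1 _)).trans (perm_pull m1 m2 m3 x R rest)
          · simp only [if_neg hx3]
            obtain ⟨R', s1, s2, s3, hp⟩ := ih m1 m2 m3 (R ++ [x]) h1 h2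
              (by intro y hy
                  rcases List.mem_append.mp hy with hy | hy
                  · exact hR _ hy
                  · simp at hy; omega)
            refine ⟨R', s1, s2, s3, ?_⟩
            rwa [List.append_assoc] at hp

theorem produtoM3_spec : Claim_equal_produtoM3 := by
  intro lista _ hpre
  unfold Spec_produtoM3
  rcases lista with _ | ⟨a, lista⟩
  · simp [Pre_produtoM3] at hpre
  rcases lista with _ | ⟨b, lista⟩
  · simp [Pre_produtoM3] at hpre
  rcases lista with _ | ⟨c, rest⟩
  · simp [Pre_produtoM3] at hpre
  -- evaluate the three indexings and the slice on a :: b :: c :: rest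
  have g0 : PySem.List.pyGet? (a :: b :: c :: rest) 0 = some a := PySem.List.pyGet?_zero_cons _ _
  have g1 : PySem.List.pyGet? (a :: b :: c :: rest) 1 = some b := by
    simp [PySem.List.pyGet?, PySem.List.pyIdx?]
    rw [if_pos (by omega)]; rfl
  have g2 : PySem.List.pyGet? (a :: b :: c :: rest) 2 = some c := by
    simp [PySem.List.pyGet?, PySem.List.pyIdx?]
    rw [if_pos (by omega)]; rfl
  have gs : PySem.List.slice (a :: b :: c :: rest) (some 3) none = rest := by
    rw [show (3 : Int) = ((3 : Nat) : Int) by norm_num, PySem.List.slice_from_natCast]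
    simp
  simp only [produtoM3, g0, g1, g2, gs]
  -- the three initial swaps sort (a, b, c)
  set p1 := if a > b then (b, a) else (a, b) with hp1
  set p2 := if p1.2 > c then (c, p1.2) else (p1.2, c) with hp2
  set p3 := if p1.1 > p2.1 then (p2.1, p1.1) else (p1.1, p2.1) with hp3
  have hinit : p3.1 ≤ p3.2 ∧ p3.2 ≤ p2.2 ∧ ([p3.1, p3.2, p2.2]).Perm [a, b, c] := by
    rw [hp3, hp2, hp1]
    split_ifs <;> refine ⟨?_, ?_, ?_⟩ <;> dsimp only at * <;>
      first
        | omega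
        | exact List.Perm.refl _
        | exact p_swap12 a b c
        | exact p_swap23 a b c
        | exact p_rot a b c
        | exact p_rot2 a b c
        | exact p_rev a b c
  obtain ⟨hi1, hi2, hiperm⟩ := hinit
  obtain ⟨R', s1, s2, s3, hp⟩ := fold_inv rest p3.1 p3.2 p2.2 [] hi1 hi2 (by simp)
  set r := rest.foldl m3Step (p3.1, p3.2, p2.2) with hr
  -- r.1 :: r.2.1 :: r.2.2 :: R'  ~  a :: b :: c :: rest
  have hperm : (r.1 :: r.2.1 :: r.2.2 :: R').Perm (a :: b :: c :: rest) := by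
    refine hp.trans ?_
    simpa using hiperm.append_right rest
  -- name the sorted order of the input
  have hsorted : PySem.List.sorted (a :: b :: c :: rest) (fun x => x) false
      = r.1 :: r.2.1 :: r.2.2 :: PySem.List.sorted R' (fun x => x) false := by
    apply PySem.List.sorted_id_eq_of_perm_of_pairwise
    · exact ((((PySem.List.sorted_perm R' (fun x => x) false).cons _).cons _).cons _).trans hperm
    · refine List.Pairwise.cons ?_ (List.Pairwise.cons ?_ (List.Pairwise.cons ?_
        (PySem.List.sorted_pairwise R' (fun x => x))))
      · intro y hy
        rcases List.mem_cons.mp hy with rfl | hy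
        · exact s1
        rcases List.mem_cons.mp hy with rfl | hy
        · exact s1.trans s2
        · rw [PySem.List.mem_sorted] at hy
          exact s1.trans (s2.trans (s3 y hy))
      · intro y hy
        rcases List.mem_cons.mp hy with rfl | hy
        · exact s2
        · rw [PySem.List.mem_sorted] at hy
          exact s2.trans (s3 y hy)
      · intro y hy
        rw [PySem.List.mem_sorted] at hy
        exact s3 y hy
  simp only [produtoM3_alt, hsorted]
  have g1' : PySem.List.pyGet? (r.1 :: r.2.1 :: r.2.2 :: PySem.List.sorted R' (fun x => x) false) 1
      = some r.2.1 := by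
    simp [PySem.List.pyGet?, PySem.List.pyIdx?]
    rw [if_pos (by omega)]; rfl
  have g2' : PySem.List.pyGet? (r.1 :: r.2.1 :: r.2.2 :: PySem.List.sorted R' (fun x => x) false) 2
      = some r.2.2 := by
    simp [PySem.List.pyGet?, PySem.List.pyIdx?]
    rw [if_pos (by omega)]; rfl
  simp [PySem.List.pyGet?_zero_cons, g1', g2']
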